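-- pv_equiv track=rewrite | github.com/isavita/advent_generated | python/day17_part2_2022.py | get_chamber_profile
-- ===== SOURCE A (Python) =====
-- def get_chamber_profile(chamber, highest_y, depth=30):
--     """
--     Returns a tuple representing the profile of the chamber's top 'depth' rows.
--     This helps in detecting cycles by capturing the shape of the chamber's surface.
--     """
--     profile = []
--     for x in range(7):
--         # Find the highest rock in this column
--         for y in range(highest_y, highest_y - depth, -1):
--             if (x, y) in chamber:
--                 profile.append(highest_y - y)
--                 break
--         else:
--             # No rock found in this column within the depth
--             profile.append(highest_y + 1)
--     return tuple(profile)
-- ===== SOURCE B (Python) =====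
-- def get_chamber_profile(chamber, highest_y, depth=30):
--     """One pass over the rock set building a per-column maximum-height index,
--     then read the 7 columns, instead of scanning a depth-row grid window per column."""
--     colmax = {}
--     for (x, y) in chamber:
--         if highest_y - depth < y <= highest_y:
--             m = colmax.get(x)
--             if m is None or y > m:
--                 colmax[x] = y
--     profile = []
--     for x in range(7):
--         if x in colmax:
--             profile.append(highest_y - colmax[x])
--         else:
--             profile.append(highest_y + 1)
--     return tuple(profile)
-- ===== Notes on version B (the rewrite author's own statement) =====
-- stated objective: faster
-- what changed: Replaces the per-column scan over a depth-row grid window with list membership tests by a single pass over the rock list that builds a per-column maximum-height dictionary, then reads the 7 columns from it.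
import Mathlib
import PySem

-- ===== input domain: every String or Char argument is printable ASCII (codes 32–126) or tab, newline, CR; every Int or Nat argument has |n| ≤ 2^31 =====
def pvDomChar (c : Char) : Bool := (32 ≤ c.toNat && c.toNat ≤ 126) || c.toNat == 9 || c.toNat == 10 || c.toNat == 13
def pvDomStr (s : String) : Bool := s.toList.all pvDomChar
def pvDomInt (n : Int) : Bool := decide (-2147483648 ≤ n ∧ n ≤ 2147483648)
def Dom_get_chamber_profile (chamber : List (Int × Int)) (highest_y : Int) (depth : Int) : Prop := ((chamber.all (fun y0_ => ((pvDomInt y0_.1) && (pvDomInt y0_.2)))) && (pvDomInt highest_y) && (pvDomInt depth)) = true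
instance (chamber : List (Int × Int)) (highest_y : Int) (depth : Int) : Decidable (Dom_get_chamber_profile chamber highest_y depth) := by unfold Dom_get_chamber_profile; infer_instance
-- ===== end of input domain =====

-- B builds a per-column maximum-height dictionary in one pass over the rock list
-- instead of scanning a depth-row grid window per column (objective: faster in a timing run).


-- ===== PORT A =====
-- inner 'for y in range(highest_y, highest_y-depth, -1): … break / else' loop of A
def gcpColA (chamber : List (Int × Int)) (highest_y : Int) (x : Int) : List Int → Int
  | [] => highest_y + 1
  | y :: rest => if (x, y) ∈ chamber then highest_y - y else gcpColA chamber highest_y x rest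

def get_chamber_profile (chamber : List (Int × Int)) (highest_y : Int) (depth : Int) : List Int :=
  (PySem.List.pyRange 0 7 1).foldl
    (fun profile x =>
      profile ++ [gcpColA chamber highest_y x (PySem.List.pyRange highest_y (highest_y - depth) (-1))]) []

-- ===== PORT B =====
-- body of B's single pass: colmax[x] = y when y is in the window and beats the stored max
def gcpStepB (highest_y depth : Int) (d : PySem.Dict Int Int) (p : Int × Int) : PySem.Dict Int Int :=
  if highest_y - depth < p.2 ∧ p.2 ≤ highest_y then
    match d.get? p.1 with
    | none => d.insert p.1 p.2
    | some m => if m < p.2 then d.insert p.1 p.2 else d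
  else d

def get_chamber_profile_alt (chamber : List (Int × Int)) (highest_y : Int) (depth : Int) : List Int :=
  let colmax := chamber.foldl (gcpStepB highest_y depth) PySem.Dict.empty
  (PySem.List.pyRange 0 7 1).foldl
    (fun profile x =>
      profile ++ [match colmax.get? x with
                  | some m => highest_y - m
                  | none => highest_y + 1]) []

-- ===== PRECONDITION & SPEC =====
def Spec_get_chamber_profile (chamber : List (Int × Int)) (highest_y : Int) (depth : Int) (out : List Int) : Prop := out = get_chamber_profile_alt chamber highest_y depth
instance (chamber : List (Int × Int)) (highest_y : Int) (depth : Int) (out : List Int) : Decidable (Spec_get_chamber_profile chamber highest_y depth out) := by unfold Spec_get_chamber_profile; infer_instance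

-- ===== CLAIM (what is proved, stated in full; the proofs are below) =====
def Claim_equal_get_chamber_profile : Prop := ∀ (chamber : List (Int × Int)) (highest_y : Int) (depth : Int), Dom_get_chamber_profile chamber highest_y depth → Spec_get_chamber_profile chamber highest_y depth (get_chamber_profile chamber highest_y depth)

-- ===== LEMMAS AND PROOFS =====

-- option-valued running max of the in-window y's of column x, a proof-side spec
def gcpFoldMax (highest_y depth x : Int) (chamber : List (Int × Int)) (acc : Option Int) : Option Int :=
  chamber.foldl
    (fun acc p =>
      if p.1 = x ∧ highest_y - depth < p.2 ∧ p.2 ≤ highest_y then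
        match acc with
        | none => some p.2
        | some m => some (max m p.2)
      else acc) acc

theorem gcpDict_get_eq_foldMax (highest_y depth x : Int) (chamber : List (Int × Int)) :
    ∀ d : PySem.Dict Int Int,
      (chamber.foldl (gcpStepB highest_y depth) d).get? x
        = gcpFoldMax highest_y depth x chamber (d.get? x) := by
  induction chamber with
  | nil => intro d; rfl
  | cons p rest ih =>
    intro d
    simp only [List.foldl_cons, gcpFoldMax] at *
    rw [ih]
    congr 1
    unfold gcpStepB
    by_cases hw : highest_y - depth < p.2 ∧ p.2 ≤ highest_y
    · simp only [if_pos hw]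
      by_cases hx : p.1 = x
      · subst hx
        cases hget : d.get? p.1 with
        | none =>
          simp [PySem.Dict.get?_insert_self, hw]
        | some m =>
          by_cases hm : m < p.2
          · simp [if_pos hm, PySem.Dict.get?_insert_self, hw, max_eq_right (le_of_lt hm)]
          · simp [hget, if_neg hm, hw, max_eq_left (le_of_not_gt hm)]
      · have hx' : ¬ (x = p.1) := fun h => hx h.symm
        cases hget : d.get? p.1 with
        | none => simp [PySem.Dict.get?_insert, hx, hx']
        | some m =>
          by_cases hm : m < p.2
          · simp [if_pos hm, PySem.Dict.get?_insert, hx, hx']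
          · simp [if_neg hm, hx]
    · simp [hw]

theorem gcpFoldMax_none_iff (highest_y depth x : Int) (chamber : List (Int × Int)) :
    ∀ acc, gcpFoldMax highest_y depth x chamber acc = none ↔
      acc = none ∧ ∀ p ∈ chamber, ¬ (p.1 = x ∧ highest_y - depth < p.2 ∧ p.2 ≤ highest_y) := by
  induction chamber with
  | nil => intro acc; simp [gcpFoldMax]
  | cons p rest ih =>
    intro acc
    simp only [gcpFoldMax, List.foldl_cons] at *
    rw [ih]
    by_cases hc : p.1 = x ∧ highest_y - depth < p.2 ∧ p.2 ≤ highest_y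
    · simp only [if_pos hc]
      cases acc <;> simp [hc]
    · simp only [if_neg hc]
      constructor
      · rintro ⟨h1, h2⟩
        exact ⟨h1, List.forall_mem_cons.mpr ⟨hc, h2⟩⟩
      · rintro ⟨h1, h2⟩
        exact ⟨h1, fun q hq => h2 q (List.mem_cons_of_mem _ hq)⟩

theorem gcpFoldMax_some (highest_y depth x : Int) (chamber : List (Int × Int)) :
    ∀ acc m, gcpFoldMax highest_y depth x chamber acc = some m →
      ((acc = some m ∨ ∃ p ∈ chamber, (p.1 = x ∧ highest_y - depth < p.2 ∧ p.2 ≤ highest_y) ∧ p.2 = m)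
       ∧ (∀ p ∈ chamber, (p.1 = x ∧ highest_y - depth < p.2 ∧ p.2 ≤ highest_y) → p.2 ≤ m)
       ∧ (∀ m0, acc = some m0 → m0 ≤ m)) := by
  induction chamber with
  | nil => intro acc m h; simp [gcpFoldMax] at h; simp [h]
  | cons p rest ih =>
    intro acc m h
    simp only [gcpFoldMax, List.foldl_cons] at h
    by_cases hc : p.1 = x ∧ highest_y - depth < p.2 ∧ p.2 ≤ highest_y
    · rw [if_pos hc] at h
      cases hacc : acc with
      | none =>
        subst hacc
        obtain ⟨hwit, hub, hacc'⟩ := ih _ _ h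
        refine ⟨?_, ?_, by simp⟩
        · rcases hwit with h1 | ⟨q, hq, hcq, hqm⟩
          · exact Or.inr ⟨p, List.mem_cons_self, hc, by injection h1⟩
          · exact Or.inr ⟨q, List.mem_cons_of_mem _ hq, hcq, hqm⟩
        · intro q hq hcq
          rcases List.mem_cons.mp hq with rfl | hq'
          · exact hacc' _ rfl
          · exact hub q hq' hcq
      | some m0 =>
        subst hacc
        obtain ⟨hwit, hub, hacc'⟩ := ih _ _ h
        have hmax := hacc' (max m0 p.2) rfl
        refine ⟨?_, ?_, ?_⟩
        · rcases hwit with h1 | ⟨q, hq, hcq, hqm⟩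
          · have : max m0 p.2 = m := by injection h1
            rcases max_choice m0 p.2 with he | he
            · exact Or.inl (by rw [← this, he])
            · exact Or.inr ⟨p, List.mem_cons_self, hc, by rw [← this, he]⟩
          · exact Or.inr ⟨q, List.mem_cons_of_mem _ hq, hcq, hqm⟩
        · intro q hq hcq
          rcases List.mem_cons.mp hq with rfl | hq'
          · exact le_trans (le_trans (le_max_right m0 q.2) (le_refl _)) hmax
          · exact hub q hq' hcq
        · intro m1 hm1
          have he : m0 = m1 := by injection hm1
          subst he
          exact le_trans (le_max_left m0 p.2) hmax
    · rw [if_neg hc] at h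
      obtain ⟨hwit, hub, hacc'⟩ := ih _ _ h
      refine ⟨?_, ?_, hacc'⟩
      · rcases hwit with h1 | ⟨q, hq, hcq, hqm⟩
        · exact Or.inl h1
        · exact Or.inr ⟨q, List.mem_cons_of_mem _ hq, hcq, hqm⟩
      · intro q hq hcq
        rcases List.mem_cons.mp hq with rfl | hq'
        · exact absurd hcq hc
        · exact hub q hq' hcq

-- A's inner loop is find? over the descending range
theorem gcpColA_eq_find (chamber : List (Int × Int)) (highest_y x : Int) (ys : List Int) :
    gcpColA chamber highest_y x ys
      = match ys.find? (fun y => decide ((x, y) ∈ chamber)) with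
        | some y => highest_y - y
        | none => highest_y + 1 := by
  induction ys with
  | nil => rfl
  | cons y rest ih =>
    by_cases h : (x, y) ∈ chamber
    · simp [gcpColA, h, List.find?]
    · simp [gcpColA, h, List.find?, ih]

-- find? on a strictly descending range returns the largest in-window hit
theorem find_desc_some_aux (p : Int → Bool) (b y : Int) :
    ∀ (n : Nat) (a : Int), (a - b).toNat = n →
      (PySem.List.pyRange a b (-1)).find? p = some y →
      p y = true ∧ b < y ∧ y ≤ a ∧ ∀ z, y < z → z ≤ a → p z = false := by
  intro n
  induction n with
  | zero =>
    intro a hn h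
    rw [PySem.List.pyRange_neg_one_eq_nil (by omega)] at h
    simp at h
  | succ n ihn =>
    intro a hn h
    have hab : b < a := by omega
    rw [PySem.List.pyRange_neg_one_cons hab, List.find?_cons] at h
    by_cases hpa : p a = true
    · simp [hpa] at h
      subst h
      exact ⟨hpa, hab, le_refl _, fun z hz hz' => absurd (lt_of_lt_of_le hz hz') (lt_irrefl _)⟩
    · simp [hpa] at h
      obtain ⟨h1, h2, h3, h4⟩ := ihn (a - 1) (by omega) h
      refine ⟨h1, h2, by omega, fun z hz hz' => ?_⟩
      rcases eq_or_lt_of_le hz' with rfl | hlt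
      · simpa using hpa
      · exact h4 z hz (by omega)

theorem find_desc_some (p : Int → Bool) (a b y : Int)
    (h : (PySem.List.pyRange a b (-1)).find? p = some y) :
    p y = true ∧ b < y ∧ y ≤ a ∧ ∀ z, y < z → z ≤ a → p z = false :=
  find_desc_some_aux p b y (a - b).toNat a rfl h

theorem find_desc_none (p : Int → Bool) (a b : Int)
    (h : (PySem.List.pyRange a b (-1)).find? p = none) :
    ∀ z, b < z → z ≤ a → p z = false := by
  intro z hz hz'
  have := List.find?_eq_none.mp h z (by rw [PySem.List.mem_pyRange_neg_one]; exact ⟨hz, hz'⟩)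
  simpa using this

-- per-column agreement of the two ports
theorem gcpCol_eq (chamber : List (Int × Int)) (highest_y depth x : Int) :
    gcpColA chamber highest_y x (PySem.List.pyRange highest_y (highest_y - depth) (-1))
      = (match (chamber.foldl (gcpStepB highest_y depth) PySem.Dict.empty).get? x with
         | some m => highest_y - m
         | none => highest_y + 1) := by
  rw [gcpColA_eq_find, gcpDict_get_eq_foldMax]
  have hempty : (PySem.Dict.empty : PySem.Dict Int Int).get? x = none := rfl
  rw [hempty]
  cases hf : (PySem.List.pyRange highest_y (highest_y - depth) (-1)).find?
      (fun y => decide ((x, y) ∈ chamber)) with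
  | none =>
    cases hg : gcpFoldMax highest_y depth x chamber none with
    | none => rfl
    | some m =>
      obtain ⟨hwit, _, _⟩ := gcpFoldMax_some highest_y depth x chamber none m hg
      rcases hwit with h1 | ⟨q, hq, ⟨hqx, hqw1, hqw2⟩, hqm⟩
      · exact absurd h1 (by simp)
      · have hnf := find_desc_none _ _ _ hf q.2 hqw1 hqw2
        obtain ⟨q1, q2⟩ := q
        dsimp only at hqx hqw1 hqw2 hnf
        subst hqx
        simp [hq] at hnf
  | some y =>
    obtain ⟨hpy, hyw1, hyw2, hymax⟩ := find_desc_some _ _ _ _ hf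
    have hymem : (x, y) ∈ chamber := by simpa using hpy
    cases hg : gcpFoldMax highest_y depth x chamber none with
    | none =>
      have := (gcpFoldMax_none_iff highest_y depth x chamber none).mp hg
      exact absurd ⟨rfl, hyw1, hyw2⟩ (this.2 (x, y) hymem)
    | some m =>
      obtain ⟨hwit, hub, _⟩ := gcpFoldMax_some highest_y depth x chamber none m hg
      have hym : y ≤ m := hub (x, y) hymem ⟨rfl, hyw1, hyw2⟩
      rcases hwit with h1 | ⟨q, hq, ⟨hqx, hqw1, hqw2⟩, hqm⟩
      · exact absurd h1 (by simp)
      · obtain ⟨q1, q2⟩ := q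
        dsimp only at hqx hqm
        subst hqx; subst hqm
        have hmmem : (q1, q2) ∈ chamber := hq
        have hmy : q2 ≤ y := by
          by_contra hlt
          have := hymax q2 (by omega) (by omega)
          simp [hmmem] at this
        have : y = q2 := le_antisymm hym hmy
        rw [this]

theorem get_chamber_profile_spec : Claim_equal_get_chamber_profile := by
  intro chamber highest_y depth _
  unfold Spec_get_chamber_profile get_chamber_profile get_chamber_profile_alt
  simp only [gcpCol_eq chamber highest_y depth]

-- ===== VERDICT (by name: the statement is the Claim_ definition above) =====
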